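-- pv_equiv track=rewrite | github.com/choseogyeong/CRYPTBARA | scripts/generate_call_tree.py | build_call_chains
-- ===== SOURCE A (Python) =====
-- def build_call_chains(edges, start="main", path=None, visited=None, results=None):
--     """Recursively build call chains from caller→callee edges."""
--     if path is None:
--         path = []
--     if visited is None:
--         visited = set()
--     if results is None:
--         results = []
--
--     path.append(start)
--     visited.add(start)
--
--     if start not in edges or not edges[start]:
--         results.append(" → ".join(path))
--     else:
--         for callee in edges[start]:
--             if callee not in visited:
--                 build_call_chains(edges, callee, list(path), visited.copy(), results)
--
--     return results
-- ===== SOURCE B (Python) =====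
-- def build_call_chains(edges, start="main", path=None, visited=None, results=None):
--     """Iteratively build call chains from caller->callee edges with an explicit DFS stack."""
--     if path is None:
--         path = []
--     if visited is None:
--         visited = set()
--     if results is None:
--         results = []
--     path.append(start)
--     visited.add(start)
--     stack = [(start, path, visited)]
--     while stack:
--         node, p, vis = stack.pop()
--         callees = edges.get(node)
--         if not callees:
--             results.append(" → ".join(p))
--         else:
--             for callee in reversed(callees):
--                 if callee not in vis:
--                     stack.append((callee, p + [callee], vis | {callee}))
--     return results
-- ===== Notes on version B (the rewrite author's own statement) =====
-- stated objective: alternative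
-- what changed: A's recursive DFS (recursion per callee with copied path/visited) is replaced by an iterative DFS over an explicit stack of (node, path, visited) frames, pushing children in reverse so pop order preserves A's left-to-right chain order.
import Mathlib
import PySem

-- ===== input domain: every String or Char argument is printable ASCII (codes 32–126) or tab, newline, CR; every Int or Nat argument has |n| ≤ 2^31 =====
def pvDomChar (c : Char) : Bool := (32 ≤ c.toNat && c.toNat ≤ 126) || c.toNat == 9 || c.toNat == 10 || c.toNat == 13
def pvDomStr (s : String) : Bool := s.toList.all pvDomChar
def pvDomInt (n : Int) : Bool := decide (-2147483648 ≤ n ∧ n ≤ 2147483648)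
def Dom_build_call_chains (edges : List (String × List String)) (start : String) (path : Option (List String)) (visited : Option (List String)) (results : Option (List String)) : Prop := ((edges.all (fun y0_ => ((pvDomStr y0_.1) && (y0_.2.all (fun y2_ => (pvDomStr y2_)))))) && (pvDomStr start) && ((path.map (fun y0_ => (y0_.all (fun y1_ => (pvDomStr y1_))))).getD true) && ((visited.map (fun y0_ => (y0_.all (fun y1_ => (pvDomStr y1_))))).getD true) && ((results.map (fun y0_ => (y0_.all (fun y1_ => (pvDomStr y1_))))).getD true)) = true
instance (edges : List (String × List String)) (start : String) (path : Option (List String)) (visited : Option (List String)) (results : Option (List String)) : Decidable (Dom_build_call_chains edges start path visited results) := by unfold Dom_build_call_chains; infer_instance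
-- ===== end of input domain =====

-- B replaces A's recursion by an iterative DFS over an explicit stack of (node, path, visited)
-- frames (objective: alternative decomposition, same cost). Equivalence is about the RETURN value;
-- both A and B also mutate caller-supplied path/visited/results the same way (append/add of start,
-- appends to results), which the Lean ports model functionally.

-- ===== PORT A =====
-- termination helpers for both ports: the callees named in `edges` not yet visited
def pvUniv (edges : List (String × List String)) : Finset String :=
  (edges.flatMap (fun kv => kv.2)).toFinset

def pvMiss (edges : List (String × List String)) (v : List String) : Nat :=
  ((pvUniv edges).filter (fun x => x ∉ v)).card

theorem pvMem_of_get? {edges : List (String × List String)} {k : String} {cs : List String}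
    (h : (PySem.Dict.mk edges).get? k = some cs) : (k, cs) ∈ edges := by
  induction edges with
  | nil => simp [PySem.Dict.get?] at h
  | cons kv rest ih =>
    rcases kv with ⟨k', v'⟩
    rw [PySem.Dict.get?_mk_cons] at h
    by_cases hk : k' == k
    · simp [hk] at h; subst h
      simp [(by simpa using hk : k' = k)]
    · simp [hk] at h
      exact List.mem_cons_of_mem _ (ih h)

theorem pvMem_univ_of_get? {edges : List (String × List String)} {k : String} {cs : List String}
    {c : String} (h : (PySem.Dict.mk edges).get? k = some cs) (hc : c ∈ cs) :
    c ∈ pvUniv edges := by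
  unfold pvUniv
  simp only [List.mem_toFinset, List.mem_flatMap]
  exact ⟨(k, cs), pvMem_of_get? h, hc⟩

theorem pvMiss_lt {edges : List (String × List String)} {c : String} {v : List String}
    (hU : c ∈ pvUniv edges) (hv : c ∉ v) :
    pvMiss edges (PySem.Set.add v c) < pvMiss edges v := by
  unfold pvMiss
  apply Finset.card_lt_card
  constructor
  · intro x hx
    simp only [Finset.mem_filter] at hx ⊢
    refine ⟨hx.1, fun hxv => hx.2 ?_⟩
    simp [PySem.Set.mem_add, hxv]
  · intro hsub
    have := hsub (by simp [Finset.mem_filter, hU, hv] : c ∈ (pvUniv edges).filter (fun x => x ∉ v))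
    simp [Finset.mem_filter, PySem.Set.mem_add] at this

-- literal port of A's recursion: append start to path, add start to visited, emit the joined
-- path at dead ends, else recurse left-to-right on unvisited callees sharing `results`
def goA (edges : List (String × List String)) (start : String) (path : List String)
    (visited : PySem.Set String) (results : List String) : List String :=
  let path' := path ++ [start]
  let visited' := PySem.Set.add visited start
  match _h : (PySem.Dict.mk edges).get? start with
  | none => results ++ [PySem.Str.join " → " path']
  | some cs =>
    if cs = [] then results ++ [PySem.Str.join " → " path']
    else cs.attach.foldl
      (fun r c => if _hc : c.1 ∈ visited' then r
        else goA edges c.1 path' visited' r) results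
termination_by pvMiss edges (PySem.Set.add visited start)
decreasing_by
  exact pvMiss_lt (pvMem_univ_of_get? _h c.2) _hc

def build_call_chains (edges : List (String × List String)) (start : String) (path : Option (List String)) (visited : Option (List String)) (results : Option (List String)) : List String :=
  let path := path.getD []
  let visited := PySem.Set.ofList (visited.getD [])
  let results := results.getD []
  goA edges start path visited results

-- ===== PORT B =====
-- termination measure for the stack loop: Σ over frames of B^(unvisited count), B > any branching
def pvBranch (edges : List (String × List String)) : Nat :=
  (edges.map (fun kv => kv.2.length)).foldr max 0 + 1

def pvMu (edges : List (String × List String))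
    (stack : List (String × List String × List String)) : Nat :=
  (stack.map (fun f => pvBranch edges ^ pvMiss edges f.2.2)).sum

theorem pvMu_lt_pop (edges : List (String × List String))
    (f : String × List String × List String) (rest : List (String × List String × List String)) :
    pvMu edges rest < pvMu edges (f :: rest) := by
  unfold pvMu
  simp only [List.map_cons, List.sum_cons]
  have : 0 < pvBranch edges ^ pvMiss edges f.2.2 :=
    Nat.pow_pos (by unfold pvBranch; omega)
  omega

theorem pvMu_lt_expand {edges : List (String × List String)} {node : String} {cs : List String}
    (p vis : List String) (rest : List (String × List String × List String))
    (h : (PySem.Dict.mk edges).get? node = some cs) :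
    pvMu edges ((cs.filter (fun c => decide (c ∉ vis))).map
        (fun c => (c, p ++ [c], PySem.Set.add vis c)) ++ rest)
      < pvMu edges ((node, p, vis) :: rest) := by
  have hB1 : 1 ≤ pvBranch edges := by unfold pvBranch; omega
  have hcs : cs.length ≤ pvBranch edges - 1 := by
    have hmem : cs.length ∈ edges.map (fun kv => kv.2.length) :=
      List.mem_map.2 ⟨(node, cs), pvMem_of_get? h, rfl⟩
    have : cs.length ≤ (edges.map (fun kv => kv.2.length)).foldr max 0 :=
      List.le_max_of_le hmem le_rfl
    unfold pvBranch; omega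
  unfold pvMu
  rw [List.map_append, List.sum_append]
  simp only [List.map_cons, List.sum_cons]
  have hfront :
      ((cs.filter (fun c => decide (c ∉ vis))).map
          (fun c => (c, p ++ [c], PySem.Set.add vis c))).map
        (fun f => pvBranch edges ^ pvMiss edges f.2.2)
      = (cs.filter (fun c => decide (c ∉ vis))).map
          (fun c => pvBranch edges ^ pvMiss edges (PySem.Set.add vis c)) := by
    rw [List.map_map]; rfl
  rw [hfront]
  -- every child weight is ≤ B^(k-1) with k = pvMiss edges vis ≥ 1
  by_cases hk : pvMiss edges vis = 0
  · -- then no callee can pass the filter: each c ∈ cs is in pvUniv, so it must be in vis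
    have hnil : cs.filter (fun c => decide (c ∉ vis)) = [] := by
      rw [List.filter_eq_nil_iff]
      intro c hc
      simp only [decide_eq_true_eq, Decidable.not_not]
      by_contra hcv
      have hcU : c ∈ pvUniv edges := pvMem_univ_of_get? h hc
      have : c ∈ (pvUniv edges).filter (fun x => x ∉ vis) := by
        simp [Finset.mem_filter, hcU, hcv]
      have := Finset.card_pos.2 ⟨c, this⟩
      unfold pvMiss at hk; omega
    rw [hnil]
    simp only [List.map_nil, List.sum_nil]
    have : 0 < pvBranch edges ^ pvMiss edges vis := Nat.pow_pos (by omega)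
    omega
  · have hbound : ∀ w ∈ (cs.filter (fun c => decide (c ∉ vis))).map
        (fun c => pvBranch edges ^ pvMiss edges (PySem.Set.add vis c)),
        w ≤ pvBranch edges ^ (pvMiss edges vis - 1) := by
      intro w hw
      rcases List.mem_map.1 hw with ⟨c, hc, rfl⟩
      rcases List.mem_filter.1 hc with ⟨hcs', hcv⟩
      have hcv : c ∉ vis := by simpa using hcv
      have hlt : pvMiss edges (PySem.Set.add vis c) < pvMiss edges vis :=
        pvMiss_lt (pvMem_univ_of_get? h hcs') hcv
      exact Nat.pow_le_pow_right (by omega) (by omega)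
    have hsum := List.sum_le_card_nsmul _ _ hbound
    have hlen : ((cs.filter (fun c => decide (c ∉ vis))).map
        (fun c => pvBranch edges ^ pvMiss edges (PySem.Set.add vis c))).length
        ≤ pvBranch edges - 1 := by
      rw [List.length_map]
      exact le_trans (List.length_filter_le _ _) hcs
    have hkey : ((cs.filter (fun c => decide (c ∉ vis))).map
        (fun c => pvBranch edges ^ pvMiss edges (PySem.Set.add vis c))).sum
        < pvBranch edges ^ pvMiss edges vis := by
      calc _ ≤ ((cs.filter (fun c => decide (c ∉ vis))).map
              (fun c => pvBranch edges ^ pvMiss edges (PySem.Set.add vis c))).length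
              * pvBranch edges ^ (pvMiss edges vis - 1) := by simpa [smul_eq_mul] using hsum
        _ ≤ (pvBranch edges - 1) * pvBranch edges ^ (pvMiss edges vis - 1) :=
              Nat.mul_le_mul_right _ hlen
        _ < pvBranch edges * pvBranch edges ^ (pvMiss edges vis - 1) := by
              have : 0 < pvBranch edges ^ (pvMiss edges vis - 1) := Nat.pow_pos (by omega)
              have : pvBranch edges - 1 < pvBranch edges := by omega
              exact Nat.mul_lt_mul_of_lt_of_le this le_rfl (Nat.pow_pos (by omega))
        _ = pvBranch edges ^ (pvMiss edges vis - 1 + 1) := by rw [pow_succ, Nat.mul_comm]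
        _ = pvBranch edges ^ pvMiss edges vis := by congr 1; omega
    omega

-- literal port of B (Source B): the Lean list models the Python stack with its TOP at the head, so
-- Source B's reversed push of the children corresponds to prepending them here in original order
def goB (edges : List (String × List String))
    (stack : List (String × List String × List String)) (results : List String) : List String :=
  match stack with
  | [] => results
  | (node, p, vis) :: rest =>
    match _h : (PySem.Dict.mk edges).get? node with
    | none => goB edges rest (results ++ [PySem.Str.join " → " p])
    | some cs =>
      if cs = [] then goB edges rest (results ++ [PySem.Str.join " → " p])
      else goB edges ((cs.filter (fun c => decide (c ∉ vis))).map
          (fun c => (c, p ++ [c], PySem.Set.add vis c)) ++ rest) results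
termination_by pvMu edges stack
decreasing_by
  · exact pvMu_lt_pop edges _ rest
  · exact pvMu_lt_pop edges _ rest
  · exact pvMu_lt_expand p vis rest _h

def build_call_chains_alt (edges : List (String × List String)) (start : String) (path : Option (List String)) (visited : Option (List String)) (results : Option (List String)) : List String :=
  let path := path.getD []
  let visited := PySem.Set.ofList (visited.getD [])
  let results := results.getD []
  let path := path ++ [start]
  let visited := PySem.Set.add visited start
  goB edges [(start, path, visited)] results

-- ===== PRECONDITION & SPEC =====
def Spec_build_call_chains (edges : List (String × List String)) (start : String) (path : Option (List String)) (visited : Option (List String)) (results : Option (List String)) (out : List String) : Prop := out = build_call_chains_alt edges start path visited results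
instance (edges : List (String × List String)) (start : String) (path : Option (List String)) (visited : Option (List String)) (results : Option (List String)) (out : List String) : Decidable (Spec_build_call_chains edges start path visited results out) := by unfold Spec_build_call_chains; infer_instance

-- ===== CLAIM (what is proved, stated in full; the proofs are below) =====
def Claim_equal_build_call_chains : Prop := ∀ (edges : List (String × List String)) (start : String) (path : Option (List String)) (visited : Option (List String)) (results : Option (List String)), Dom_build_call_chains edges start path visited results → Spec_build_call_chains edges start path visited results (build_call_chains edges start path visited results)

-- ===== LEMMAS AND PROOFS =====

-- pure characterisation: the list of chains contributed by one (node, path, visited) state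
def ch (edges : List (String × List String)) (node : String) (p : List String)
    (vis : PySem.Set String) : List String :=
  match _h : (PySem.Dict.mk edges).get? node with
  | none => [PySem.Str.join " → " p]
  | some cs =>
    if cs = [] then [PySem.Str.join " → " p]
    else cs.attach.flatMap
      (fun c => if _hc : c.1 ∈ vis then []
        else ch edges c.1 (p ++ [c.1]) (PySem.Set.add vis c.1))
termination_by pvMiss edges vis
decreasing_by
  exact pvMiss_lt (pvMem_univ_of_get? _h c.2) _hc

theorem flatMap_ite_filter (l vis : List String) (g : String → List String) :
    l.flatMap (fun c => if c ∈ vis then [] else g c)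
      = (l.filter (fun c => decide (c ∉ vis))).flatMap g := by
  induction l with
  | nil => rfl
  | cons a l ih => by_cases ha : a ∈ vis <;> simp [ha, ih]

theorem attach_flatMap_filter (cs : List String) (vis : List String) (g : String → List String) :
    cs.attach.flatMap (fun c => if c.1 ∈ vis then [] else g c.1)
      = (cs.filter (fun c => decide (c ∉ vis))).flatMap g := by
  rw [← flatMap_ite_filter cs vis g]
  conv_rhs => rw [← List.attach_map_subtype_val cs]
  rw [List.flatMap_map]

theorem goA_eq_ch (edges : List (String × List String)) (start : String) (path : List String)
    (visited : PySem.Set String) (res : List String) :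
    goA edges start path visited res
      = res ++ ch edges start (path ++ [start]) (PySem.Set.add visited start) := by
  suffices H : ∀ n (start : String) (path : List String) (visited : PySem.Set String)
      (res : List String), pvMiss edges (PySem.Set.add visited start) = n →
      goA edges start path visited res
        = res ++ ch edges start (path ++ [start]) (PySem.Set.add visited start) from
    H _ start path visited res rfl
  intro n
  induction n using Nat.strong_induction_on with
  | _ n ih =>
    intro start path visited res hn
    rw [goA.eq_def, ch.eq_def]
    simp only []
    split
    · simp
    · split
      · simp
      · rename_i cs heq hne
        simp only [dite_eq_ite]
        have hstep : ∀ c ∈ cs.attach, ∀ r : List String,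
            (if c.1 ∈ PySem.Set.add visited start then r
              else goA edges c.1 (path ++ [start]) (PySem.Set.add visited start) r)
            = r ++ (if c.1 ∈ PySem.Set.add visited start then []
              else ch edges c.1 ((path ++ [start]) ++ [c.1])
                (PySem.Set.add (PySem.Set.add visited start) c.1)) := by
          rintro ⟨c, hcs⟩ _ r
          by_cases hc : c ∈ PySem.Set.add visited start
          · simp [hc]
          · rw [if_neg hc, if_neg hc]
            have hlt : pvMiss edges (PySem.Set.add (PySem.Set.add visited start) c) < n := by
              rw [← hn]
              exact pvMiss_lt (pvMem_univ_of_get? heq hcs) hc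
            exact (ih _ hlt c (path ++ [start]) (PySem.Set.add visited start) r rfl).trans
              (by simp)
        exact (PySem.List.foldl_congr_mem' _ _ _ _ hstep).trans
          (PySem.List.foldl_append_eq_flatMap _ _ _)

theorem goB_eq_ch (edges : List (String × List String))
    (stack : List (String × List String × List String)) (res : List String) :
    goB edges stack res = res ++ stack.flatMap (fun f => ch edges f.1 f.2.1 f.2.2) := by
  suffices H : ∀ n (stack : List (String × List String × List String)) (res : List String),
      pvMu edges stack = n →
      goB edges stack res = res ++ stack.flatMap (fun f => ch edges f.1 f.2.1 f.2.2) from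
    H _ stack res rfl
  intro n
  induction n using Nat.strong_induction_on with
  | _ n ih =>
    intro stack res hn
    rw [goB.eq_def]
    match stack, hn with
    | [], hn => simp
    | (node, p, vis) :: rest, hn =>
      simp only []
      have hch := ch.eq_def edges node p vis
      split
      · rename_i heq
        rw [ih _ (by rw [← hn]; exact pvMu_lt_pop edges _ rest) rest _ rfl]
        have hv : ch edges node p vis = [PySem.Str.join " → " p] := by
          rw [hch]
          split
          · rfl
          · rename_i cs' heq'
            rw [heq] at heq'
            cases heq'
        simp [hv]
      · split
        · rename_i cs heq hnil
          rw [ih _ (by rw [← hn]; exact pvMu_lt_pop edges _ rest) rest _ rfl]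
          have hv : ch edges node p vis = [PySem.Str.join " → " p] := by
            rw [hch]
            split
            · rfl
            · rename_i cs' heq'
              rw [heq] at heq'
              injection heq' with h'
              rw [if_pos (by rw [← h', hnil])]
          simp [hv]
        · rename_i cs heq hne
          rw [ih _ (by rw [← hn]; exact pvMu_lt_expand p vis rest heq) _ _ rfl]
          have hchv : ch edges node p vis
              = (cs.filter (fun c => decide (c ∉ vis))).flatMap
                  (fun c => ch edges c (p ++ [c]) (PySem.Set.add vis c)) := by
            rw [hch]
            split
            · rename_i heq'
              rw [heq] at heq'
              cases heq'
            · rename_i cs' heq'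
              rw [heq] at heq'
              injection heq' with h'
              subst h'
              rw [if_neg hne]
              simp only [dite_eq_ite]
              exact attach_flatMap_filter cs vis
                (fun c => ch edges c (p ++ [c]) (PySem.Set.add vis c))
          rw [List.flatMap_append, List.flatMap_map, List.flatMap_cons, hchv]

-- ===== VERDICT (by name: the statement is the Claim_ definition above) =====
theorem build_call_chains_spec : Claim_equal_build_call_chains := by
  intro edges start path visited results _
  unfold Spec_build_call_chains build_call_chains build_call_chains_alt
  rw [goA_eq_ch, goB_eq_ch]
  simp
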